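-- pv_equiv track=rewrite | github.com/BIGtigr/GenomicPipelines | ORfinder.1.0.py | rightcodon
-- ===== SOURCE A (Python) =====
-- def rightcodon(seq,point,codon,length):
--         n_site = point
--         start = int(point)
--         end = point + length
--         if point + length > len(seq):
--                 end = len(seq)
--         for i in range(point,end,3):
--                 NNN = seq[i:i+3]
--                 if NNN in codon:
--                         n_site = i+3
--                         #print ('\t\t%s\t%s' %(n_site,NNN)),
--         return n_site
-- ===== SOURCE B (Python) =====
-- def rightcodon(seq, point, codon, length):
--     end = min(point + length, len(seq))
--     for i in reversed(range(point, end, 3)):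
--         if seq[i:i+3] in codon:
--             return i + 3
--     return point
-- ===== Notes on version B (the rewrite author's own statement) =====
-- stated objective: alternative
-- what changed: B scans the codon positions in reverse and returns immediately at the first match (the last forward match), instead of A's forward scan that keeps overwriting an accumulator.
import Mathlib
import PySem

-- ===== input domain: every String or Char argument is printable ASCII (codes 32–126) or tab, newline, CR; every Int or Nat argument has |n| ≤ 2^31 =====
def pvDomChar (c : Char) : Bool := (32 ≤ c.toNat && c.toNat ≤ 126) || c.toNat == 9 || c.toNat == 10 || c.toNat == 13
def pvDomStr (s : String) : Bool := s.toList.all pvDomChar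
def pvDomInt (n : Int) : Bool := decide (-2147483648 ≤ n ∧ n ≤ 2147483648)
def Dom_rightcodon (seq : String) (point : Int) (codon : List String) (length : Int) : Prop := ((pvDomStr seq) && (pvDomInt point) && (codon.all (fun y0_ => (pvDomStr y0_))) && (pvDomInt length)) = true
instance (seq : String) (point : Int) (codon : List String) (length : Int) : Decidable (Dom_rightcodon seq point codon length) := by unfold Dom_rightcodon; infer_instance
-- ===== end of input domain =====

-- B scans the same codon positions in reverse with an early return at the first match, instead of A's forward accumulator loop; same cost, no speed claim.
-- ===== PORT A =====
def rightcodon (seq : String) (point : Int) (codon : List String) (length : Int) : Int :=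
  let n_site := point
  let _start := point  -- int(point) is the identity on an int
  let end_ := point + length
  let end_ := if point + length > PySem.Str.len seq then PySem.Str.len seq else end_
  (PySem.List.pyRange point end_ 3).foldl
    (fun n_site i =>
      let NNN := PySem.Str.slice seq (some i) (some (i + 3))
      if NNN ∈ codon then i + 3 else n_site)
    n_site

-- ===== PORT B =====
def rightcodon_alt (seq : String) (point : Int) (codon : List String) (length : Int) : Int :=
  let end_ := min (point + length) (PySem.Str.len seq)
  match (PySem.List.pyRange point end_ 3).reverse.find?
      (fun i => decide (PySem.Str.slice seq (some i) (some (i + 3)) ∈ codon)) with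
  | some i => i + 3
  | none => point

-- ===== PRECONDITION & SPEC =====
def Spec_rightcodon (seq : String) (point : Int) (codon : List String) (length : Int) (out : Int) : Prop := out = rightcodon_alt seq point codon length
instance (seq : String) (point : Int) (codon : List String) (length : Int) (out : Int) : Decidable (Spec_rightcodon seq point codon length out) := by unfold Spec_rightcodon; infer_instance

-- ===== CLAIM (what is proved, stated in full; the proofs are below) =====
def Claim_equal_rightcodon : Prop := ∀ (seq : String) (point : Int) (codon : List String) (length : Int), Dom_rightcodon seq point codon length → Spec_rightcodon seq point codon length (rightcodon seq point codon length)

-- ===== LEMMAS AND PROOFS =====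

-- ===== VERDICT (by name: the statement is the Claim_ definition above) =====
-- Generic bridge: a fold that overwrites its accumulator at each match equals
-- the first match of the reversed list.
theorem foldl_if_eq_find_reverse {α β : Type} (p : α → Bool) (f : α → β) :
    ∀ (l : List α) (init : β),
      l.foldl (fun acc i => if p i then f i else acc) init =
      (match l.reverse.find? p with | some i => f i | none => init) := by
  intro l
  induction l with
  | nil => intro init; simp
  | cons x t ih =>
    intro init
    rw [List.foldl_cons, ih]
    simp only [List.reverse_cons, List.find?_append]
    cases h : t.reverse.find? p with
    | some i => simp
    | none =>
      simp only [Option.none_or, List.find?_singleton]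
      by_cases hp : p x = true <;> simp [hp]

-- ===== VERDICT (by name: the statement is the Claim_ definition above) =====
theorem rightcodon_spec : Claim_equal_rightcodon := by
  unfold Claim_equal_rightcodon Spec_rightcodon
  intro seq point codon length _
  unfold rightcodon rightcodon_alt
  dsimp only
  have hend : (if point + length > PySem.Str.len seq then PySem.Str.len seq else point + length)
      = min (point + length) (PySem.Str.len seq) := by
    split <;> omega
  rw [hend]
  have hfun : (fun (n_site i : Int) =>
        if PySem.Str.slice seq (some i) (some (i + 3)) ∈ codon then i + 3 else n_site)
      = (fun (n_site i : Int) =>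
        if (fun i => decide (PySem.Str.slice seq (some i) (some (i + 3)) ∈ codon)) i = true
        then (fun (i : Int) => i + 3) i else n_site) := by
    funext a b; simp
  rw [hfun, foldl_if_eq_find_reverse]
  cases List.find? (fun i => decide (PySem.Str.slice seq (some i) (some (i + 3)) ∈ codon))
      (PySem.List.pyRange point (min (point + length) (PySem.Str.len seq)) 3).reverse <;> rfl
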